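-- pv_equiv track=rewrite | github.com/xxrep/SRAG | agent.py | parse_thought_answer
-- ===== SOURCE A (Python) =====
-- def parse_thought_answer(direct_out):
--     lines = direct_out.split('\n')
--     thought = "None"
--     answer = "None"
--     for line in lines:
--         line = line.strip()
--         if line.startswith("Thought:") and thought=="None":
--             parse_line = line.strip().split("Thought: ")
--             if len(parse_line) > 1:
--                 thought = parse_line[1]
--         elif line.startswith("Answer:") and answer=="None":
--             parse_line = line.strip().split("Answer: ")
--             if len(parse_line)>1:
--                 answer = parse_line[1]
--     return thought, answer
-- ===== SOURCE B (Python) =====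
-- def parse_thought_answer(direct_out):
--     def extract(prefix):
--         for line in direct_out.split('\n'):
--             line = line.strip()
--             if line.startswith(prefix + ':'):
--                 parts = line.split(prefix + ': ')
--                 if len(parts) > 1:
--                     return parts[1]
--         return 'None'
--     return extract('Thought'), extract('Answer')
-- ===== Notes on version B (the rewrite author's own statement) =====
-- stated objective: simpler
-- what changed: A's single stateful pass with a mutable (thought, answer) pair and an if/elif chain becomes one helper extract(prefix) run twice, each an independent early-return scan; Pre_ excludes inputs containing a line whose 'Thought: '/'Answer: ' payload is literally 'None', a sentinel-collision corner where first-match (B) and A's skip-and-take-a-later-line are both defensible.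
-- outside the precondition, e.g. on parse_thought_answer('Thought: None\nThought: X'): A returns ('X', 'None'), B returns ('None', 'None')
import Mathlib
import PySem

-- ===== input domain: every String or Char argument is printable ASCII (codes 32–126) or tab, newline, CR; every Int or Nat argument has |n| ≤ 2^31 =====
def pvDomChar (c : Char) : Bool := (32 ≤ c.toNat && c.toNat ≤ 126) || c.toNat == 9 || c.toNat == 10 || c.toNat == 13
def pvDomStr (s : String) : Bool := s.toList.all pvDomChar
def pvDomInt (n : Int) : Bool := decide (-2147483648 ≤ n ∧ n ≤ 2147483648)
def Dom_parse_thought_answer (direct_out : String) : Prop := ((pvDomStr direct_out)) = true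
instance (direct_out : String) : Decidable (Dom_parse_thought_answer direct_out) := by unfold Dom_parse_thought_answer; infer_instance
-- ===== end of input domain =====

-- B replaces A's single stateful if/elif pass over the lines with two independent
-- early-return scans (one parametrised helper per field); objective: simpler.

-- ===== PORT A =====
-- A's loop body; split(sep) with sep ≠ "" is always some, so .getD [] is exact, and the
-- `.length > 1` guards make each pyGet? (Python's parse_line[1]) a some, so its default
-- value is never used
def pvStepA (ta : String × String) (line0 : String) : String × String :=
  let line := PySem.Str.strip line0
  if PySem.Str.startswith line "Thought:" = true ∧ ta.1 = "None" then
    let parse_line := (PySem.Str.split? (PySem.Str.strip line) "Thought: ").getD []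
    if 1 < parse_line.length then
      ((PySem.List.pyGet? parse_line 1).getD ta.1, ta.2)
    else ta
  else if PySem.Str.startswith line "Answer:" = true ∧ ta.2 = "None" then
    let parse_line := (PySem.Str.split? (PySem.Str.strip line) "Answer: ").getD []
    if 1 < parse_line.length then
      (ta.1, (PySem.List.pyGet? parse_line 1).getD ta.2)
    else ta
  else ta

def parse_thought_answer (direct_out : String) : String × String :=
  let lines := (PySem.Str.split? direct_out "\n").getD []
  lines.foldl pvStepA ("None", "None")

-- ===== PORT B =====
-- B's helper extract(prefix): scan the lines, return the split payload of the first line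
-- that starts with prefix+':' and splits into more than one part on prefix+': '; else "None".
-- (tagColon = prefix+':' and tagSpace = prefix+': ' are passed precomputed.)
def pvExtract (tagColon tagSpace : String) : List String → String
  | [] => "None"
  | line0 :: rest =>
    let line := PySem.Str.strip line0
    if PySem.Str.startswith line tagColon = true then
      let parts := (PySem.Str.split? line tagSpace).getD []
      if 1 < parts.length then
        (PySem.List.pyGet? parts 1).getD "None"
      else pvExtract tagColon tagSpace rest
    else pvExtract tagColon tagSpace rest

def parse_thought_answer_alt (direct_out : String) : String × String :=
  let lines := (PySem.Str.split? direct_out "\n").getD []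
  (pvExtract "Thought:" "Thought: " lines, pvExtract "Answer:" "Answer: " lines)

-- ===== PRECONDITION & SPEC =====
-- line-wise condition: the stripped line does not start with tagColon with a split payload
-- that is literally "None"
def pvNoSentinel (tagColon tagSpace : String) (line0 : String) : Bool :=
  !(PySem.Str.startswith (PySem.Str.strip line0) tagColon &&
    (PySem.List.pyGet? ((PySem.Str.split? (PySem.Str.strip line0) tagSpace).getD []) 1 == some "None"))

-- Pre_ excludes inputs containing a line whose "Thought: "/"Answer: " payload is literally
-- "None": there the payload collides with A's "not yet found" sentinel, and first-match (B)
-- and A's skip-and-take-a-later-line are both defensible readings of this unspecified corner.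
def Pre_parse_thought_answer (direct_out : String) : Prop :=
  ∀ line ∈ (PySem.Str.split? direct_out "\n").getD [],
    pvNoSentinel "Thought:" "Thought: " line = true ∧ pvNoSentinel "Answer:" "Answer: " line = true
instance (direct_out : String) : Decidable (Pre_parse_thought_answer direct_out) := by
  unfold Pre_parse_thought_answer; infer_instance

def pvWitness_parse_thought_answer : String := "Thought: hi\nAnswer: ok"

def Spec_parse_thought_answer (direct_out : String) (out : String × String) : Prop := out = parse_thought_answer_alt direct_out
instance (direct_out : String) (out : String × String) : Decidable (Spec_parse_thought_answer direct_out out) := by unfold Spec_parse_thought_answer; infer_instance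

-- ===== CLAIM (what is proved, stated in full; the proofs are below) =====
def Claim_equal_parse_thought_answer : Prop := ∀ (direct_out : String), Dom_parse_thought_answer direct_out → Pre_parse_thought_answer direct_out → Spec_parse_thought_answer direct_out (parse_thought_answer direct_out)

-- ===== LEMMAS AND PROOFS =====

-- the first element surviving dropWhile fails the predicate
lemma pvDropWhile_head_false {α : Type} (p : α → Bool) (l : List α) (c : α) (cs : List α)
    (h : List.dropWhile p l = c :: cs) : p c = false := by
  induction l with
  | nil => simp at h
  | cons x xs ih =>
    rw [List.dropWhile_cons] at h
    by_cases hx : p x = true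
    · rw [if_pos hx] at h; exact ih h
    · rw [if_neg hx] at h
      cases h
      simpa using hx

-- Chars.strip is idempotent (A's second line.strip() is a no-op)
lemma chars_strip_idem (l : List Char) :
    PySem.Chars.strip (PySem.Chars.strip l) = PySem.Chars.strip l := by
  simp only [PySem.Chars.strip, PySem.Chars.lstrip, PySem.Chars.rstrip]
  set p := PySem.Chars.isspace with hp
  set u := List.dropWhile p l with hu
  set v := (List.dropWhile p u.reverse).reverse with hv
  have hpre : v <+: u := by
    rw [hv]
    exact List.reverse_suffix.mp (by simpa using List.dropWhile_suffix (l := u.reverse) p)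
  have hlv : List.dropWhile p v = v := by
    cases hveq : v with
    | nil => simp
    | cons c cs =>
      obtain ⟨t, ht⟩ := hpre
      rw [hveq] at ht
      have hc : p c = false :=
        pvDropWhile_head_false p l c (cs ++ t) (by rw [hu] at ht; simpa using ht.symm)
      simp [hc]
  rw [hlv, hv, List.reverse_reverse, List.dropWhile_idempotent]

lemma strip_idem (s : String) :
    PySem.Str.strip (PySem.Str.strip s) = PySem.Str.strip s := by
  simp [PySem.Str.strip, chars_strip_idem]

-- a line cannot start with both "Thought:" and "Answer:"
lemma not_both (s : String) (h : PySem.Str.startswith s "Thought:" = true) :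
    PySem.Str.startswith s "Answer:" = false := by
  rw [PySem.Str.startswith_eq, PySem.Chars.startswith_iff] at h
  rw [PySem.Str.startswith_eq]
  by_contra hb
  rw [Bool.not_eq_false, PySem.Chars.startswith_iff] at hb
  obtain ⟨t1, h1⟩ := h
  obtain ⟨t2, h2⟩ := hb
  have e1 : "Thought:".toList = ['T','h','o','u','g','h','t',':'] := by decide
  have e2 : "Answer:".toList = ['A','n','s','w','e','r',':'] := by decide
  rw [e1] at h1
  rw [e2] at h2
  rw [← h2] at h1
  simp at h1

-- length > 1 makes Python's parts[1] total
lemma pyGet1_of_len (xs : List String) (h : 1 < xs.length) :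
    PySem.List.pyGet? xs 1 = some xs[1] := by
  simp [PySem.List.pyGet?, PySem.List.pyIdx?, h]

-- under pvNoSentinel, a matching line's payload is not "None"
lemma payload_ne_none (tagColon tagSpace line0 : String)
    (hns : pvNoSentinel tagColon tagSpace line0 = true)
    (hT : PySem.Str.startswith (PySem.Str.strip line0) tagColon = true)
    (hlen : 1 < ((PySem.Str.split? (PySem.Str.strip line0) tagSpace).getD []).length) :
    ((PySem.Str.split? (PySem.Str.strip line0) tagSpace).getD [])[1] ≠ "None" := by
  intro hv
  rw [pvNoSentinel, hT] at hns
  rw [pyGet1_of_len _ hlen, hv] at hns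
  simp at hns

-- loop invariant: on sentinel-free lines, A's fold from state (t, a) computes B's two scans
lemma fold_eq (L : List String)
    (hL : ∀ line ∈ L, pvNoSentinel "Thought:" "Thought: " line = true ∧
                      pvNoSentinel "Answer:" "Answer: " line = true) :
    ∀ t a : String,
    L.foldl pvStepA (t, a) =
    ((if t = "None" then pvExtract "Thought:" "Thought: " L else t),
     (if a = "None" then pvExtract "Answer:" "Answer: " L else a)) := by
  induction L with
  | nil =>
    intro t a
    simp only [List.foldl_nil, pvExtract]
    by_cases ht : t = "None" <;> by_cases ha : a = "None"
    · subst ht; subst ha; rw [if_pos rfl]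
    · subst ht; rw [if_pos rfl, if_neg ha]
    · subst ha; rw [if_neg ht, if_pos rfl]
    · rw [if_neg ht, if_neg ha]
  | cons line0 rest ih =>
    intro t a
    have h0 := hL line0 (List.mem_cons_self ..)
    have hrest : ∀ line ∈ rest, pvNoSentinel "Thought:" "Thought: " line = true ∧
        pvNoSentinel "Answer:" "Answer: " line = true :=
      fun l hl => hL l (List.mem_cons_of_mem _ hl)
    have ih := ih hrest
    rw [List.foldl_cons]
    by_cases hT : PySem.Str.startswith (PySem.Str.strip line0) "Thought:" = true
    · have hA := not_both _ hT
      have hAn : ¬ PySem.Str.startswith (PySem.Str.strip line0) "Answer:" = true :=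
        fun h => Bool.false_ne_true (hA ▸ h)
      have eA : pvExtract "Answer:" "Answer: " (line0 :: rest) =
          pvExtract "Answer:" "Answer: " rest := by
        simp only [pvExtract]; rw [if_neg hAn]
      by_cases ht : t = "None"
      · subst ht
        by_cases hlen : 1 < ((PySem.Str.split? (PySem.Str.strip line0) "Thought: ").getD []).length
        · have hget := pyGet1_of_len _ hlen
          have hv := payload_ne_none _ _ _ h0.1 hT hlen
          have hstep : pvStepA ("None", a) line0 =
              (((PySem.Str.split? (PySem.Str.strip line0) "Thought: ").getD [])[1], a) := by
            simp only [pvStepA, strip_idem]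
            rw [if_pos ⟨hT, by trivial⟩, if_pos hlen, hget, Option.getD_some]
          have eT : pvExtract "Thought:" "Thought: " (line0 :: rest) =
              ((PySem.Str.split? (PySem.Str.strip line0) "Thought: ").getD [])[1] := by
            simp only [pvExtract]
            rw [if_pos hT, if_pos hlen, hget, Option.getD_some]
          rw [hstep, ih, eA, eT, if_pos rfl, if_neg hv]
        · have hstep : pvStepA ("None", a) line0 = ("None", a) := by
            simp only [pvStepA, strip_idem]
            rw [if_pos ⟨hT, by trivial⟩, if_neg hlen]
          have eT : pvExtract "Thought:" "Thought: " (line0 :: rest) =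
              pvExtract "Thought:" "Thought: " rest := by
            simp only [pvExtract]
            rw [if_pos hT, if_neg hlen]
          rw [hstep, ih, eT, eA]
      · have hstep : pvStepA (t, a) line0 = (t, a) := by
          simp only [pvStepA, strip_idem]
          rw [if_neg (fun h => ht h.2), if_neg (fun h => hAn h.1)]
        have eT : pvExtract "Thought:" "Thought: " (line0 :: rest) =
            if 1 < ((PySem.Str.split? (PySem.Str.strip line0) "Thought: ").getD []).length then
              (PySem.List.pyGet? ((PySem.Str.split? (PySem.Str.strip line0) "Thought: ").getD []) 1).getD "None"
            else pvExtract "Thought:" "Thought: " rest := by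
          simp only [pvExtract]
          rw [if_pos hT]
        rw [hstep, ih, eA, if_neg ht, if_neg ht]
    · have eT : pvExtract "Thought:" "Thought: " (line0 :: rest) =
          pvExtract "Thought:" "Thought: " rest := by
        simp only [pvExtract]; rw [if_neg hT]
      by_cases hA : PySem.Str.startswith (PySem.Str.strip line0) "Answer:" = true
      · by_cases ha : a = "None"
        · subst ha
          by_cases hlen : 1 < ((PySem.Str.split? (PySem.Str.strip line0) "Answer: ").getD []).length
          · have hget := pyGet1_of_len _ hlen
            have hv := payload_ne_none _ _ _ h0.2 hA hlen
            have hstep : pvStepA (t, "None") line0 =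
                (t, ((PySem.Str.split? (PySem.Str.strip line0) "Answer: ").getD [])[1]) := by
              simp only [pvStepA, strip_idem]
              rw [if_neg (fun h => hT h.1), if_pos ⟨hA, by trivial⟩, if_pos hlen, hget, Option.getD_some]
            have eA : pvExtract "Answer:" "Answer: " (line0 :: rest) =
                ((PySem.Str.split? (PySem.Str.strip line0) "Answer: ").getD [])[1] := by
              simp only [pvExtract]
              rw [if_pos hA, if_pos hlen, hget, Option.getD_some]
            rw [hstep, ih, eT, eA, if_pos rfl, if_neg hv]
          · have hstep : pvStepA (t, "None") line0 = (t, "None") := by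
              simp only [pvStepA, strip_idem]
              rw [if_neg (fun h => hT h.1), if_pos ⟨hA, by trivial⟩, if_neg hlen]
            have eA : pvExtract "Answer:" "Answer: " (line0 :: rest) =
                pvExtract "Answer:" "Answer: " rest := by
              simp only [pvExtract]
              rw [if_pos hA, if_neg hlen]
            rw [hstep, ih, eT, eA]
        · have hstep : pvStepA (t, a) line0 = (t, a) := by
            simp only [pvStepA, strip_idem]
            rw [if_neg (fun h => hT h.1), if_neg (fun h => ha h.2)]
          have eA : pvExtract "Answer:" "Answer: " (line0 :: rest) =
              if 1 < ((PySem.Str.split? (PySem.Str.strip line0) "Answer: ").getD []).length then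
                (PySem.List.pyGet? ((PySem.Str.split? (PySem.Str.strip line0) "Answer: ").getD []) 1).getD "None"
              else pvExtract "Answer:" "Answer: " rest := by
            simp only [pvExtract]
            rw [if_pos hA]
          rw [hstep, ih, eT, if_neg ha, if_neg ha]
      · have eA : pvExtract "Answer:" "Answer: " (line0 :: rest) =
            pvExtract "Answer:" "Answer: " rest := by
          simp only [pvExtract]; rw [if_neg hA]
        have hstep : pvStepA (t, a) line0 = (t, a) := by
          simp only [pvStepA, strip_idem]
          rw [if_neg (fun h => hT h.1), if_neg (fun h => hA h.1)]
        rw [hstep, ih, eT, eA]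

-- ===== VERDICT (by name: the statement is the Claim_ definition above) =====
theorem parse_thought_answer_spec : Claim_equal_parse_thought_answer := by
  intro s _ hpre
  simp only [Spec_parse_thought_answer, parse_thought_answer, parse_thought_answer_alt]
  rw [fold_eq _ hpre, if_pos rfl, if_pos rfl]
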